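-- pv_equiv track=rewrite | github.com/sweun2/Algorithm | 프로그래머스/2/42584. 주식가격/주식가격.py | solution
-- ===== SOURCE A (Python) =====
-- from collections import deque
--
-- def solution(prices):
--     pq = deque()
--     n = len(prices)
--     result = [0] * n
--
--     for i in range(n):
--         if not pq:
--             pq.append((prices[i],i))
--
--         else:
--             while pq and pq[-1][0] > prices[i] :
--                 p,index = pq.pop()
--                 result[index] = i - index
--
--             pq.append((prices[i],i))
--
--     for p,index in pq:
--         result[index] = n - 1 - index
--
--     return result
-- ===== SOURCE B (Python) =====
-- def solution(prices):
--     n = len(prices)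
--     result = []
--     for i in range(n):
--         d = n - 1 - i
--         for j in range(i + 1, n):
--             if prices[j] < prices[i]:
--                 d = j - i
--                 break
--         result.append(d)
--     return result
-- ===== Notes on version B (the rewrite author's own statement) =====
-- stated objective: simpler
-- what changed: Replaces the monotonic stack/deque with a direct per-index forward scan for the first strictly lower price, appending each duration as it is computed.
import Mathlib
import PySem

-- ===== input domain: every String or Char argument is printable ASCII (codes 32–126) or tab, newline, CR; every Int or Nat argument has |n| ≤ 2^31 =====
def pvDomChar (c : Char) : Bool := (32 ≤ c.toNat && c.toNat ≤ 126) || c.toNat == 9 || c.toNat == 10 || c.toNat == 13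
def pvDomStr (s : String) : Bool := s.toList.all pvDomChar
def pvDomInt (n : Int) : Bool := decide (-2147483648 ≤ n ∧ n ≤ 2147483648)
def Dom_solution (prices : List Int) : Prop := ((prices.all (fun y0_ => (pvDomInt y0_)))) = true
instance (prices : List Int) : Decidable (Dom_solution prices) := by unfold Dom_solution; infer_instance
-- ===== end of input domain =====

-- B replaces A's monotonic stack with a plain per-index forward scan for the first strictly
-- lower price (objective: simpler; B is O(n^2) where A is O(n), no speed claimed).

-- ===== PORT A =====
-- A's deque is used as a stack (append/pop on the right, pq[-1] = top); it is represented
-- here head-first (head = top of stack), so the final Python loop `for p,index in pq`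
-- (bottom to top) walks pq.reverse. All indices i read by prices[i] satisfy i < len(prices),
-- so List.getD is exact for the subscripts.

-- the inner `while pq and pq[-1][0] > prices[i]` loop, acting on (pq, result)
def popLoop (prices : List Int) (i : Nat) : List (Int × Nat) → List Int → List (Int × Nat) × List Int
  | [], res => ([], res)
  | (p, idx) :: rest, res =>
      if prices.getD i 0 < p then
        popLoop prices i rest (res.set idx ((i : Int) - (idx : Int)))
      else ((p, idx) :: rest, res)

-- one iteration of `for i in range(n)`
def stepA (prices : List Int) (st : List (Int × Nat) × List Int) (i : Nat) : List (Int × Nat) × List Int :=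
  if st.1.isEmpty then ((prices.getD i 0, i) :: st.1, st.2)
  else
    let st' := popLoop prices i st.1 st.2
    ((prices.getD i 0, i) :: st'.1, st'.2)

def solution (prices : List Int) : List Int :=
  let n := prices.length
  let st := (List.range n).foldl (stepA prices) ([], List.replicate n 0)
  st.1.reverse.foldl (fun res pr => res.set pr.2 ((n : Int) - 1 - (pr.2 : Int))) st.2

-- ===== PORT B =====
-- the inner `for j in range(i+1, n): if prices[j] < prices[i]: d = j - i; break`,
-- with js = the remaining values of j; falling off the list yields the default n - 1 - i
def bScan (prices : List Int) (p : Int) (i : Nat) : List Nat → Int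
  | [] => (prices.length : Int) - 1 - (i : Int)
  | j :: js => if prices.getD j 0 < p then (j : Int) - (i : Int) else bScan prices p i js

def solution_alt (prices : List Int) : List Int :=
  (List.range prices.length).map
    (fun i => bScan prices (prices.getD i 0) i (List.range' (i + 1) (prices.length - (i + 1))))

-- ===== PRECONDITION & SPEC =====
def Spec_solution (prices : List Int) (out : List Int) : Prop := out = solution_alt prices
instance (prices : List Int) (out : List Int) : Decidable (Spec_solution prices out) := by unfold Spec_solution; infer_instance

-- ===== CLAIM (what is proved, stated in full; the proofs are below) =====
def Claim_equal_solution : Prop := ∀ (prices : List Int), Dom_solution prices → Spec_solution prices (solution prices)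

-- ===== LEMMAS AND PROOFS =====

-- the value B computes for index idx
def bVal (prices : List Int) (idx : Nat) : Int :=
  bScan prices (prices.getD idx 0) idx (List.range' (idx + 1) (prices.length - (idx + 1)))

-- B scan: no drop anywhere ⇒ default
theorem bScan_no_drop (prices : List Int) (p : Int) (i : Nat) (js : List Nat)
    (h : ∀ j ∈ js, ¬ prices.getD j 0 < p) :
    bScan prices p i js = (prices.length : Int) - 1 - (i : Int) := by
  induction js with
  | nil => rfl
  | cons j js ih =>
      simp only [bScan, if_neg (h j (by simp))]
      exact ih (fun k hk => h k (by simp [hk]))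

-- B scan: first drop at j ⇒ j - i
theorem bScan_drop (prices : List Int) (p : Int) (i : Nat) (js1 js2 : List Nat) (j : Nat)
    (h1 : ∀ k ∈ js1, ¬ prices.getD k 0 < p) (h2 : prices.getD j 0 < p) :
    bScan prices p i (js1 ++ j :: js2) = (j : Int) - (i : Int) := by
  induction js1 with
  | nil => rw [List.nil_append]; simp only [bScan]; rw [if_pos h2]
  | cons k js1 ih =>
      simp only [List.cons_append, bScan, if_neg (h1 k (by simp))]
      exact ih (fun m hm => h1 m (by simp [hm]))

theorem mem_range'_one {s n m : Nat} : m ∈ List.range' s n ↔ s ≤ m ∧ m < s + n := by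
  rw [List.mem_range']
  constructor
  · rintro ⟨i, hi, rfl⟩; omega
  · rintro ⟨h1, h2⟩; exact ⟨m - s, by omega, by omega⟩

theorem getD_set_self {l : List Int} {i : Nat} {a : Int} (h : i < l.length) :
    (l.set i a).getD i 0 = a := by
  simp [List.getD, List.getElem?_set_self h]

theorem getD_set_ne {l : List Int} {i j : Nat} {a : Int} (h : i ≠ j) :
    (l.set i a).getD j 0 = l.getD j 0 := by
  simp [List.getD, List.getElem?_set_ne h]

-- the loop invariant for A's fold over range n, at the point where i indices are done
def StackInv (prices : List Int) (i : Nat) (st : List (Int × Nat) × List Int) : Prop :=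
  st.2.length = prices.length ∧
  List.Pairwise (fun a b => b.2 < a.2 ∧ b.1 ≤ a.1) st.1 ∧
  (∀ pr ∈ st.1, pr.2 < i ∧ pr.1 = prices.getD pr.2 0 ∧
      ∀ k, pr.2 < k → k < i → ¬ prices.getD k 0 < pr.1) ∧
  (∀ idx, idx < i → idx ∉ st.1.map Prod.snd → st.2.getD idx 0 = bVal prices idx)

-- splitting B's scan range at a position i inside it
theorem range'_split (a i n : Nat) (h1 : a ≤ i) (h2 : i < n) :
    List.range' a (n - a) = List.range' a (i - a) ++ i :: List.range' (i + 1) (n - (i + 1)) := by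
  have e2 : List.range' i (n - i) = i :: List.range' (i + 1) (n - (i + 1)) := by
    have h : n - i = (n - (i + 1)) + 1 := by omega
    rw [h, List.range'_succ]
  have e1 : List.range' a (i - a) ++ List.range' (a + 1 * (i - a)) (n - i) 1 = List.range' a ((i - a) + (n - i)) :=
    List.range'_append
  rw [← e2]
  have ha : a + 1 * (i - a) = i := by omega
  rw [ha] at e1
  have hb : (i - a) + (n - i) = n - a := by omega
  rw [hb] at e1
  exact e1.symm

-- what popLoop produces, given the invariant pieces
theorem popLoop_spec (prices : List Int) (i : Nat) (hin : i < prices.length) :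
    ∀ (pq : List (Int × Nat)) (res : List Int),
    res.length = prices.length →
    List.Pairwise (fun a b => b.2 < a.2 ∧ b.1 ≤ a.1) pq →
    (∀ pr ∈ pq, pr.2 < i ∧ pr.1 = prices.getD pr.2 0 ∧
        ∀ k, pr.2 < k → k < i → ¬ prices.getD k 0 < pr.1) →
    (∀ idx, idx < i → idx ∉ pq.map Prod.snd → res.getD idx 0 = bVal prices idx) →
    (popLoop prices i pq res).2.length = prices.length ∧
    List.Pairwise (fun a b => b.2 < a.2 ∧ b.1 ≤ a.1) (popLoop prices i pq res).1 ∧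
    (∀ pr ∈ (popLoop prices i pq res).1, pr ∈ pq ∧ ¬ prices.getD i 0 < pr.1) ∧
    (∀ idx, idx < i → idx ∉ (popLoop prices i pq res).1.map Prod.snd →
        (popLoop prices i pq res).2.getD idx 0 = bVal prices idx) := by
  intro pq
  induction pq with
  | nil =>
      intro res hlen _ _ hcov
      exact ⟨hlen, by simp [popLoop], by simp [popLoop], by simpa [popLoop] using hcov⟩
  | cons hd rest ih =>
      intro res hlen hpw helems hcov
      obtain ⟨p, idx⟩ := hd
      have hhead := helems (p, idx) (by simp)
      by_cases hc : prices.getD i 0 < p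
      · -- pop (p, idx), record its answer, continue
        have hpop : popLoop prices i ((p, idx) :: rest) res
            = popLoop prices i rest (res.set idx ((i : Int) - (idx : Nat))) := by
          simp only [popLoop]; rw [if_pos hc]
        rw [hpop]
        have hidxlt : idx < res.length := by omega
        have hbval : bVal prices idx = (i : Int) - (idx : Nat) := by
          unfold bVal
          rw [range'_split (idx + 1) i prices.length (by omega) hin]
          have hp' : p = prices.getD idx 0 := hhead.2.1
          rw [hp'] at hc
          refine bScan_drop prices _ idx _ _ i ?_ hc
          intro k hk
          have := mem_range'_one.mp hk
          have hk1 : idx < k := by omega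
          have hk2 : k < i := by omega
          have := hhead.2.2 k hk1 hk2
          rwa [hhead.2.1] at this
        have hres := ih (res.set idx ((i : Int) - (idx : Nat)))
          (by rw [List.length_set]; exact hlen)
          ((List.pairwise_cons.mp hpw).2)
          (fun pr hpr => helems pr (by simp [hpr]))
          (by
            intro idx' hidx' hnot
            by_cases he : idx' = idx
            · subst he
              rw [getD_set_self hidxlt, hbval]
            · rw [getD_set_ne (Ne.symm he)]
              exact hcov idx' hidx' (by simp [he, hnot]))
        refine ⟨hres.1, hres.2.1, ?_, hres.2.2.2⟩
        intro pr hpr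
        have := hres.2.2.1 pr hpr
        exact ⟨by simp [this.1], this.2⟩
      · -- stop: the whole stack stays, and everything on it is ≤ the head
        have hstop : popLoop prices i ((p, idx) :: rest) res = ((p, idx) :: rest, res) := by
          simp only [popLoop]; rw [if_neg hc]
        rw [hstop]
        refine ⟨hlen, hpw, ?_, hcov⟩
        intro pr hpr
        refine ⟨hpr, ?_⟩
        rcases List.mem_cons.mp hpr with he | hm
        · subst he; exact hc
        · have hle : pr.1 ≤ p := ((List.pairwise_cons.mp hpw).1 pr hm).2
          intro hlt
          exact hc (lt_of_lt_of_le hlt hle)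

theorem stepA_eq (prices : List Int) (i : Nat) (st : List (Int × Nat) × List Int) :
    stepA prices st i =
      ((prices.getD i 0, i) :: (popLoop prices i st.1 st.2).1, (popLoop prices i st.1 st.2).2) := by
  obtain ⟨pq, res⟩ := st
  cases pq with
  | nil => simp [stepA, popLoop]
  | cons hd tl => simp [stepA]

theorem stepA_preserves (prices : List Int) (i : Nat) (hin : i < prices.length)
    (st : List (Int × Nat) × List Int) (h : StackInv prices i st) :
    StackInv prices (i + 1) (stepA prices st i) := by
  obtain ⟨hlen, hpw, helems, hcov⟩ := h
  have hp := popLoop_spec prices i hin st.1 st.2 hlen hpw helems hcov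
  rw [stepA_eq]
  refine ⟨hp.1, ?_, ?_, ?_⟩
  · refine List.pairwise_cons.mpr ⟨?_, hp.2.1⟩
    intro pr hpr
    have hspec := hp.2.2.1 pr hpr
    exact ⟨(helems pr hspec.1).1, le_of_not_gt hspec.2⟩
  · intro pr hpr
    rcases List.mem_cons.mp hpr with he | hm
    · subst he
      exact ⟨by omega, rfl, fun k h1 h2 => by omega⟩
    · have hspec := hp.2.2.1 pr hm
      have hold := helems pr hspec.1
      refine ⟨by omega, hold.2.1, ?_⟩
      intro k h1 h2
      by_cases hk : k < i
      · exact hold.2.2 k h1 hk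
      · have : k = i := by omega
        subst this
        exact hspec.2
  · intro idx hidx hnot
    simp only [List.map_cons, List.mem_cons] at hnot
    push Not at hnot
    exact hp.2.2.2 idx (by omega) hnot.2

theorem fold_inv (prices : List Int) (i : Nat) (h : i ≤ prices.length) :
    StackInv prices i ((List.range i).foldl (stepA prices) ([], List.replicate prices.length 0)) := by
  induction i with
  | zero =>
      refine ⟨by simp, by simp, by simp, ?_⟩
      intro idx hidx; omega
  | succ i ih =>
      rw [List.range_succ, List.foldl_append, List.foldl_cons, List.foldl_nil]
      exact stepA_preserves prices i (by omega) _ (ih (by omega))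

-- the final Python loop: every stack index gets the default value
theorem final_fold (n : Nat) (L : List (Int × Nat)) (res : List Int)
    (hlen : ∀ pr ∈ L, pr.2 < res.length) (idx : Nat) :
    (L.foldl (fun r (pr : Int × Nat) => r.set pr.2 ((n : Int) - 1 - (pr.2 : Int))) res).getD idx 0 =
      if idx ∈ L.map Prod.snd then (n : Int) - 1 - (idx : Int) else res.getD idx 0 := by
  induction L generalizing res with
  | nil => simp
  | cons pr L ih =>
      rw [List.foldl_cons, ih _ (fun q hq => by rw [List.length_set]; exact hlen q (by simp [hq]))]
      by_cases hmem : idx ∈ L.map Prod.snd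
      · rw [if_pos hmem, if_pos (by simp [hmem])]
      · by_cases he : idx = pr.2
        · rw [if_neg hmem, if_pos (by simp [he]), he, getD_set_self (hlen pr (by simp))]
        · rw [if_neg hmem, if_neg (by simp [he, hmem]), getD_set_ne (Ne.symm he)]

theorem final_fold_len (n : Nat) (L : List (Int × Nat)) (res : List Int) :
    (L.foldl (fun r (pr : Int × Nat) => r.set pr.2 ((n : Int) - 1 - (pr.2 : Int))) res).length = res.length := by
  induction L generalizing res with
  | nil => rfl
  | cons pr L ih => simp [List.foldl_cons, ih]

-- ===== VERDICT (by name: the statement is the Claim_ definition above) =====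
theorem solution_spec : Claim_equal_solution := by
  intro prices _
  unfold Spec_solution solution solution_alt
  have hinv := fold_inv prices prices.length le_rfl
  set st := (List.range prices.length).foldl (stepA prices) ([], List.replicate prices.length 0) with hst
  obtain ⟨hlen, hpw, helems, hcov⟩ := hinv
  -- every index on the final stack gets the default, which is its B value
  have hstackval : ∀ pr ∈ st.1, (prices.length : Int) - 1 - (pr.2 : Nat) = bVal prices pr.2 := by
    intro pr hpr
    have he := helems pr hpr
    unfold bVal
    rw [bScan_no_drop]
    intro j hj
    have := mem_range'_one.mp hj
    have h1 : pr.2 < j := by omega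
    have h2 : j < prices.length := by omega
    have := he.2.2 j h1 h2
    rwa [he.2.1] at this
  have hL : ∀ pr ∈ st.1.reverse, pr.2 < st.2.length := by
    intro pr hpr
    have := (helems pr (List.mem_reverse.mp hpr)).1
    omega
  apply List.ext_getElem
  · rw [final_fold_len, hlen]; simp
  · intro idx h1 h2
    have hidxn : idx < prices.length := by simpa using h2
    have hgd : ∀ (l : List Int) (hl : idx < l.length), l[idx]'hl = l.getD idx 0 := by
      intro l hl
      simp [List.getD_eq_getElem?_getD, List.getElem?_eq_getElem hl]
    rw [hgd _ h1, List.getElem_map, List.getElem_range]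
    rw [final_fold]
    · by_cases hmem : idx ∈ st.1.reverse.map Prod.snd
      · rw [if_pos hmem]
        rw [List.map_reverse, List.mem_reverse] at hmem
        obtain ⟨pr, hpr, hpr2⟩ := List.mem_map.mp hmem
        have := hstackval pr hpr
        rw [hpr2] at this
        exact this
      · rw [if_neg hmem]
        rw [List.map_reverse, List.mem_reverse] at hmem
        exact hcov idx hidxn hmem
    · exact hL
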